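-- pv_equiv track=rewrite | github.com/liu9756/DualChain-SelfAg_prediction | scr/features.py | build_pairs_from_tokens
-- ===== SOURCE A (Python) =====
-- def build_pairs_from_tokens(tokens):
--     tset = set(tokens)
--     dqa = sorted([t for t in tset if t.startswith("HLA-DQA1")])
--     dqb = sorted([t for t in tset if t.startswith("HLA-DQB1")])
--     dra = sorted([t for t in tset if t.startswith("HLA-DRA")])
--     drb = sorted([t for t in tset if t.startswith("HLA-DRB")])
--
--     pairs = []
--     for a in dqa:
--         for b in dqb:
--             pairs.append(f"{a}~{b}")
--     for a in (dra if dra else []):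
--         for b in drb:
--             pairs.append(f"{a}~{b}")
--     if not dra and drb:
--         for b in drb:
--             pairs.append(f"HLA-DRA*01:01~{b}")
--
--     return sorted(set(pairs))
-- ===== SOURCE B (Python) =====
-- def build_pairs_from_tokens(tokens):
--     # Pairwise scan: instead of grouping tokens into four prefix lists and
--     # taking two cartesian products, test candidate (left, right) token pairs
--     # directly and emit x~y when the pair is a DQA1/DQB1 or DRA/DRB
--     # combination; the DRA*01:01 default is one extra scan used only when no
--     # DRA token exists.
--     ts = set(tokens)
--     lefts = [t for t in ts if t.startswith("HLA-DQA1") or t.startswith("HLA-DRA")]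
--     rights = [t for t in ts if t.startswith("HLA-DQB1") or t.startswith("HLA-DRB")]
--     pairs = set()
--     for x in lefts:
--         for y in rights:
--             if (x.startswith("HLA-DQA1") and y.startswith("HLA-DQB1")) or \
--                (x.startswith("HLA-DRA") and y.startswith("HLA-DRB")):
--                 pairs.add(x + "~" + y)
--     if not any(t.startswith("HLA-DRA") for t in ts):
--         for y in ts:
--             if y.startswith("HLA-DRB"):
--                 pairs.add("HLA-DRA*01:01~" + y)
--     return sorted(pairs)
-- ===== Notes on version B (the rewrite author's own statement) =====
-- stated objective: alternative
-- what changed: A groups the deduplicated tokens into four sorted per-prefix lists and appends their two cartesian products plus a DRA-default branch; B never builds those per-prefix groups: it scans candidate (left, right) token pairs once, emitting x~y whenever the pair matches the DQA1/DQB1 or DRA/DRB prefix combination, with one extra scan adding the HLA-DRA*01:01 default pairs when no DRA token exists, and sorts the resulting set at the end.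
import Mathlib
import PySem

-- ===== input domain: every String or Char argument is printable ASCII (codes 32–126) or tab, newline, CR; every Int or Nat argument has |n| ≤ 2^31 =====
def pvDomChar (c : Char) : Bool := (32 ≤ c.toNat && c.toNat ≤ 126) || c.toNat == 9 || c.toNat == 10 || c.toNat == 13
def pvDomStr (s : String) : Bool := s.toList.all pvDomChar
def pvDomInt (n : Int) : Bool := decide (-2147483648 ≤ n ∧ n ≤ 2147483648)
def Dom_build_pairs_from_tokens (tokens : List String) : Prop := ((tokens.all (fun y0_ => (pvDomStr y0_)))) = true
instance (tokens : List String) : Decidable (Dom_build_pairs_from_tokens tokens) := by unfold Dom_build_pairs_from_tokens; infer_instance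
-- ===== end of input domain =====

-- B replaces A's four per-prefix grouped lists and their cartesian products by a direct
-- pairwise scan over the token set, testing each ordered pair against the two prefix
-- combinations, with one extra scan for the DRA*01:01 default; objective: alternative.

-- ===== PORT A =====
def build_pairs_from_tokens (tokens : List String) : List String :=
  let tset := PySem.Set.ofList tokens
  let dqa := PySem.List.sorted (tset.filter (fun t => PySem.Str.startswith t "HLA-DQA1")) (fun x => x) false
  let dqb := PySem.List.sorted (tset.filter (fun t => PySem.Str.startswith t "HLA-DQB1")) (fun x => x) false
  let dra := PySem.List.sorted (tset.filter (fun t => PySem.Str.startswith t "HLA-DRA")) (fun x => x) false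
  let drb := PySem.List.sorted (tset.filter (fun t => PySem.Str.startswith t "HLA-DRB")) (fun x => x) false
  let pairs : List String := []
  let pairs := dqa.foldl (fun acc a => dqb.foldl (fun acc b => acc ++ [a ++ "~" ++ b]) acc) pairs
  let pairs := (if dra.isEmpty then ([] : List String) else dra).foldl
      (fun acc a => drb.foldl (fun acc b => acc ++ [a ++ "~" ++ b]) acc) pairs
  let pairs := if dra.isEmpty && !drb.isEmpty then
      drb.foldl (fun acc b => acc ++ ["HLA-DRA*01:01" ++ "~" ++ b]) pairs
    else pairs
  PySem.List.sorted (PySem.Set.ofList pairs) (fun x => x) false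

-- ===== PORT B =====
-- Source B's pair test: (x, y) is a DQA1/DQB1 or DRA/DRB combination
def pvPairOk (x y : String) : Bool :=
  (PySem.Str.startswith x "HLA-DQA1" && PySem.Str.startswith y "HLA-DQB1") ||
  (PySem.Str.startswith x "HLA-DRA" && PySem.Str.startswith y "HLA-DRB")

def build_pairs_from_tokens_alt (tokens : List String) : List String :=
  let ts := PySem.Set.ofList tokens
  let lefts := ts.filter (fun t => PySem.Str.startswith t "HLA-DQA1" || PySem.Str.startswith t "HLA-DRA")
  let rights := ts.filter (fun t => PySem.Str.startswith t "HLA-DQB1" || PySem.Str.startswith t "HLA-DRB")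
  let pairs : PySem.Set String := PySem.Set.empty
  let pairs := lefts.foldl (fun acc x =>
      rights.foldl (fun acc y => if pvPairOk x y then PySem.Set.add acc (x ++ "~" ++ y) else acc) acc) pairs
  let pairs := if !(ts.any (fun t => PySem.Str.startswith t "HLA-DRA")) then
      ts.foldl (fun acc y => if PySem.Str.startswith y "HLA-DRB" then
          PySem.Set.add acc ("HLA-DRA*01:01" ++ "~" ++ y) else acc) pairs
    else pairs
  PySem.List.sorted pairs (fun x => x) false

-- ===== PRECONDITION & SPEC =====
def Spec_build_pairs_from_tokens (tokens : List String) (out : List String) : Prop := out = build_pairs_from_tokens_alt tokens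
instance (tokens : List String) (out : List String) : Decidable (Spec_build_pairs_from_tokens tokens out) := by unfold Spec_build_pairs_from_tokens; infer_instance

-- ===== CLAIM (what is proved, stated in full; the proofs are below) =====
def Claim_equal_build_pairs_from_tokens : Prop := ∀ (tokens : List String), Dom_build_pairs_from_tokens tokens → Spec_build_pairs_from_tokens tokens (build_pairs_from_tokens tokens)

-- ===== LEMMAS AND PROOFS =====

-- membership of a guarded Set.add loop
theorem pv_mem_foldl_add_if {α β : Type} [BEq β] [LawfulBEq β]
    (l : List α) (s : List β) (c : α → Bool) (f : α → β) (z : β) :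
    z ∈ l.foldl (fun s x => if c x then PySem.Set.add s (f x) else s) s ↔
      z ∈ s ∨ ∃ x ∈ l, c x = true ∧ z = f x := by
  induction l generalizing s with
  | nil => simp
  | cons a l ih =>
    rw [List.foldl_cons]
    by_cases h : c a = true
    · simp [h, ih, PySem.Set.mem_add]; tauto
    · simp [h, ih]

theorem pv_nodup_foldl_add_if {α β : Type} [BEq β] [LawfulBEq β]
    (l : List α) (s : List β) (c : α → Bool) (f : α → β) (hs : s.Nodup) :
    (l.foldl (fun s x => if c x then PySem.Set.add s (f x) else s) s).Nodup := by
  induction l generalizing s with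
  | nil => exact hs
  | cons a l ih =>
    rw [List.foldl_cons]
    by_cases h : c a = true
    · simp only [h, if_true]; exact ih _ (PySem.Set.nodup_add _ _ hs)
    · simp only [h]; exact ih _ hs

-- membership of Source B's nested pairwise loop
theorem pv_mem_foldl2 {β : Type} [BEq β] [LawfulBEq β]
    (l l2 : List String) (s : List β) (c : String → String → Bool) (f : String → String → β) (z : β) :
    z ∈ l.foldl (fun acc x => l2.foldl (fun acc y => if c x y then PySem.Set.add acc (f x y) else acc) acc) s ↔
      z ∈ s ∨ ∃ x ∈ l, ∃ y ∈ l2, c x y = true ∧ z = f x y := by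
  induction l generalizing s with
  | nil => simp
  | cons a l ih =>
    rw [List.foldl_cons, ih, pv_mem_foldl_add_if]
    simp only [List.mem_cons]
    constructor
    · rintro ((h | h) | h)
      · exact Or.inl h
      · obtain ⟨y, hy, hc, hz⟩ := h; exact Or.inr ⟨a, Or.inl rfl, y, hy, hc, hz⟩
      · obtain ⟨x, hx, rest⟩ := h; exact Or.inr ⟨x, Or.inr hx, rest⟩
    · rintro (h | ⟨x, (rfl | hx), rest⟩)
      · exact Or.inl (Or.inl h)
      · exact Or.inl (Or.inr rest)
      · exact Or.inr ⟨x, hx, rest⟩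

theorem pv_nodup_foldl2 {β : Type} [BEq β] [LawfulBEq β]
    (l l2 : List String) (s : List β) (c : String → String → Bool) (f : String → String → β) (hs : s.Nodup) :
    (l.foldl (fun acc x => l2.foldl (fun acc y => if c x y then PySem.Set.add acc (f x y) else acc) acc) s).Nodup := by
  induction l generalizing s with
  | nil => exact hs
  | cons a l ih => exact ih _ (pv_nodup_foldl_add_if _ _ _ _ hs)

-- ===== VERDICT (by name: the statement is the Claim_ definition above) =====
theorem build_pairs_from_tokens_spec : Claim_equal_build_pairs_from_tokens := by
  intro tokens _
  unfold Spec_build_pairs_from_tokens build_pairs_from_tokens build_pairs_from_tokens_alt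
  simp only [PySem.List.foldl_append_singleton_eq_map, PySem.List.foldl_append_eq_flatMap,
    List.nil_append]
  rw [PySem.List.sorted_id_eq_sorted_id_iff_perm]
  refine (List.perm_ext_iff_of_nodup (PySem.Set.nodup_ofList _) ?_).mpr ?_
  · split
    · exact pv_nodup_foldl_add_if _ _ _ _ (pv_nodup_foldl2 _ _ _ _ _ List.nodup_nil)
    · exact pv_nodup_foldl2 _ _ _ _ _ List.nodup_nil
  · intro z
    rw [PySem.Set.mem_ofList]
    by_cases h3 : List.filter (fun t => PySem.Chars.startswith t.toList ['H','L','A','-','D','R','A']) (PySem.Set.ofList tokens) = []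
    · have hs3 : (PySem.List.sorted (List.filter (fun t => PySem.Chars.startswith t.toList ['H','L','A','-','D','R','A']) (PySem.Set.ofList tokens)) fun x => x) = [] :=
        (PySem.List.sorted_eq_nil_iff _ _ _).mpr h3
      have hanyB : (List.any (PySem.Set.ofList tokens) fun t => PySem.Str.startswith t "HLA-DRA") = false := by
        rw [List.any_eq_false]
        intro t ht
        simpa using List.filter_eq_nil_iff.mp h3 t ht
      have hany : ∀ x ∈ tokens, PySem.Chars.startswith x.toList ['H','L','A','-','D','R','A'] = false := by
        intro t ht
        simpa using List.filter_eq_nil_iff.mp h3 t ((PySem.Set.mem_ofList _ _).mpr ht)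
      rw [hanyB]
      simp only [Bool.not_false, if_true, pv_mem_foldl_add_if, pv_mem_foldl2]
      by_cases h4 : List.filter (fun t => PySem.Chars.startswith t.toList ['H','L','A','-','D','R','B']) (PySem.Set.ofList tokens) = []
      · have hs4 : (PySem.List.sorted (List.filter (fun t => PySem.Chars.startswith t.toList ['H','L','A','-','D','R','B']) (PySem.Set.ofList tokens)) fun x => x) = [] :=
          (PySem.List.sorted_eq_nil_iff _ _ _).mpr h4
        have hdrb : ∀ x ∈ tokens, PySem.Chars.startswith x.toList ['H','L','A','-','D','R','B'] = false := by
          intro t ht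
          simpa using List.filter_eq_nil_iff.mp h4 t ((PySem.Set.mem_ofList _ _).mpr ht)
        simp [hs3, hs4, pvPairOk, PySem.List.mem_sorted, List.mem_filter]
        constructor
        · rintro ⟨a, ⟨ha, hqa⟩, b, ⟨hb, hqb⟩, hz⟩
          exact Or.inl ⟨a, ⟨ha, Or.inl hqa⟩, b, ⟨hb, Or.inl hqb⟩, Or.inl ⟨hqa, hqb⟩, hz.symm⟩
        · rintro (⟨x, ⟨hx, hpx⟩, y, ⟨hy, hpy⟩, (⟨h1, h2⟩ | ⟨h1, h2⟩), hz⟩ | ⟨x, hx, hdrbx, hz⟩)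
          · exact ⟨x, ⟨hx, h1⟩, y, ⟨hy, h2⟩, hz.symm⟩
          · exact absurd h1 (by simp [hany x hx])
          · exact absurd hdrbx (by simp [hdrb x hx])
      · have hs4 : ¬ (PySem.List.sorted (List.filter (fun t => PySem.Chars.startswith t.toList ['H','L','A','-','D','R','B']) (PySem.Set.ofList tokens)) fun x => x) = [] := by
          rw [PySem.List.sorted_eq_nil_iff]; exact h4
        simp [hs3, hs4, pvPairOk, PySem.List.mem_sorted, List.mem_filter]
        constructor
        · rintro (⟨a, ⟨ha, hqa⟩, b, ⟨hb, hqb⟩, hz⟩ | ⟨a, ⟨ha, hra⟩, hz⟩)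
          · exact Or.inl ⟨a, ⟨ha, Or.inl hqa⟩, b, ⟨hb, Or.inl hqb⟩, Or.inl ⟨hqa, hqb⟩, hz.symm⟩
          · exact Or.inr ⟨a, ha, hra, hz.symm⟩
        · rintro (⟨x, ⟨hx, hpx⟩, y, ⟨hy, hpy⟩, (⟨h1, h2⟩ | ⟨h1, h2⟩), hz⟩ | ⟨x, hx, hdrbx, hz⟩)
          · exact Or.inl ⟨x, ⟨hx, h1⟩, y, ⟨hy, h2⟩, hz.symm⟩
          · exact absurd h1 (by simp [hany x hx])
          · exact Or.inr ⟨x, ⟨hx, hdrbx⟩, hz.symm⟩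
    · have hs3 : ¬ (PySem.List.sorted (List.filter (fun t => PySem.Chars.startswith t.toList ['H','L','A','-','D','R','A']) (PySem.Set.ofList tokens)) fun x => x) = [] := by
        rw [PySem.List.sorted_eq_nil_iff]; exact h3
      have hanyB : (List.any (PySem.Set.ofList tokens) fun t => PySem.Str.startswith t "HLA-DRA") = true := by
        rw [List.any_eq_true]
        obtain ⟨t, ht, hp⟩ : ∃ t ∈ PySem.Set.ofList tokens, PySem.Chars.startswith t.toList ['H','L','A','-','D','R','A'] = true := by
          by_contra hc
          push Not at hc
          exact h3 (List.filter_eq_nil_iff.mpr (fun t ht => by simp [hc t ht]))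
        exact ⟨t, ht, by simpa using hp⟩
      rw [hanyB]
      simp only [Bool.not_true]
      rw [if_neg (by simp : ¬ (false = true))]
      rw [pv_mem_foldl2]
      simp [hs3, pvPairOk, PySem.List.mem_sorted, List.mem_filter]
      constructor
      · rintro (⟨a, ⟨ha, h1⟩, b, ⟨hb, h2⟩, hz⟩ | ⟨a, ⟨ha, h1⟩, b, ⟨hb, h2⟩, hz⟩)
        · exact ⟨a, ⟨ha, Or.inl h1⟩, b, ⟨hb, Or.inl h2⟩, Or.inl ⟨h1, h2⟩, hz.symm⟩
        · exact ⟨a, ⟨ha, Or.inr h1⟩, b, ⟨hb, Or.inr h2⟩, Or.inr ⟨h1, h2⟩, hz.symm⟩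
      · rintro ⟨x, ⟨hx, hpx⟩, y, ⟨hy, hpy⟩, (⟨h1, h2⟩ | ⟨h1, h2⟩), hz⟩
        · exact Or.inl ⟨x, ⟨hx, h1⟩, y, ⟨hy, h2⟩, hz.symm⟩
        · exact Or.inr ⟨x, ⟨hx, h1⟩, y, ⟨hy, h2⟩, hz.symm⟩
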